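-- pv_equiv track=rewrite | github.com/qianshan1122/MFAfold | test.py | matrix_to_dot_bracket
-- ===== SOURCE A (Python) =====
-- def matrix_to_dot_bracket(matrix):
--     """
--     将RNA配对矩阵转换为点括号图。
--
--     参数:
--     - matrix: 一个n x n的二维列表，代表RNA的配对信息。
--
--     返回:
--     - dot_bracket: 字符串，代表RNA结构的点括号图表示。
--     """
--     size = len(matrix)
--     dot_bracket = ['.'] * size  # 初始化点括号图，全部设为未配对（点）
--
--     for i in range(size):
--         for j in range(i + 1, size):
--             if matrix[i][j] == 1:  # 如果找到配对
--                 dot_bracket[i] = '('  # 配对起始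
--                 dot_bracket[j] = ')'  # 配对结束
--
--     return ''.join(dot_bracket)
-- ===== SOURCE B (Python) =====
-- def matrix_to_dot_bracket(matrix):
--     size = len(matrix)
--     chars = []
--     for k in range(size):
--         if any(matrix[k][j] == 1 for j in range(k + 1, size)):
--             chars.append('(')
--         elif any(matrix[i][k] == 1 for i in range(k)):
--             chars.append(')')
--         else:
--             chars.append('.')
--     return ''.join(chars)
-- ===== Notes on version B (the rewrite author's own statement) =====
-- stated objective: alternative
-- what changed: B decides each output character independently per position k (any '(' partner to the right, elif any ')' partner above, else '.'), instead of A's initialize-then-scatter writes over all pairs; the elif order encodes A's '('-over-')' precedence.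
import Mathlib
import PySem

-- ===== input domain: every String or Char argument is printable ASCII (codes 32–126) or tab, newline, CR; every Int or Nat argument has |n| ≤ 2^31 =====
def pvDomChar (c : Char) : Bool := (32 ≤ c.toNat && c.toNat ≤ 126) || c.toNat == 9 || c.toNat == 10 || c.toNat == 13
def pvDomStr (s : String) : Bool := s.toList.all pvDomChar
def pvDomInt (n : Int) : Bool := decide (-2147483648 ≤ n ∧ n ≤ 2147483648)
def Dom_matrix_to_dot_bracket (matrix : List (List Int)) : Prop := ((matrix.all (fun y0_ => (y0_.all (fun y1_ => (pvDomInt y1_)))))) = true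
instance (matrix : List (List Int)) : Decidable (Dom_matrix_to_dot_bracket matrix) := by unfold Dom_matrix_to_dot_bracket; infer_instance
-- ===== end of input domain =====

-- B builds each output character independently per position, instead of A's scatter-writes over all pairs (alternative decomposition, same cost).

-- ===== PORT A =====
-- A: db = ['.']*size; for i in range(size): for j in range(i+1,size): if matrix[i][j]==1: db[i]='('; db[j]=')'; return ''.join(db)
-- (the list of one-character strings is modelled as a List Char; ''.join = String.ofList)
def matrix_to_dot_bracket (matrix : List (List Int)) : String :=
  let size : Int := PySem.List.len matrix
  let db : List Char := List.replicate size.toNat '.'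
  let db := (PySem.List.pyRange 0 size).foldl (fun db i =>
    (PySem.List.pyRange (i + 1) size).foldl (fun db j =>
      if PySem.List.pyGetD (PySem.List.pyGetD matrix i []) j 0 = 1 then
        (db.set i.toNat '(').set j.toNat ')'
      else db) db) db
  String.ofList db

-- ===== PORT B =====
-- B: per position k, '(' if some matrix[k][j]==1 with j>k, elif ')' if some matrix[i][k]==1 with i<k, else '.'
def matrix_to_dot_bracket_alt (matrix : List (List Int)) : String :=
  let size : Int := PySem.List.len matrix
  String.ofList ((PySem.List.pyRange 0 size).map (fun k =>
    if (PySem.List.pyRange (k + 1) size).any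
        (fun j => PySem.List.pyGetD (PySem.List.pyGetD matrix k []) j 0 == 1) then '('
    else if (PySem.List.pyRange 0 k).any
        (fun i => PySem.List.pyGetD (PySem.List.pyGetD matrix i []) k 0 == 1) then ')'
    else '.'))

-- ===== PRECONDITION & SPEC =====
-- Python A raises IndexError when some row i with i+1 < size is shorter than size; exactly those inputs are excluded.
def Pre_matrix_to_dot_bracket (matrix : List (List Int)) : Prop :=
  ∀ i ∈ List.range matrix.length, i + 1 < matrix.length → matrix.length ≤ (matrix.getD i []).length
instance (matrix : List (List Int)) : Decidable (Pre_matrix_to_dot_bracket matrix) := by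
  unfold Pre_matrix_to_dot_bracket; infer_instance

def pvWitness_matrix_to_dot_bracket : List (List Int) := [[0, 1], [0, 0]]

def Spec_matrix_to_dot_bracket (matrix : List (List Int)) (out : String) : Prop := out = matrix_to_dot_bracket_alt matrix
instance (matrix : List (List Int)) (out : String) : Decidable (Spec_matrix_to_dot_bracket matrix out) := by unfold Spec_matrix_to_dot_bracket; infer_instance

-- ===== CLAIM (what is proved, stated in full; the proofs are below) =====
def Claim_equal_matrix_to_dot_bracket : Prop := ∀ (matrix : List (List Int)), Dom_matrix_to_dot_bracket matrix → Pre_matrix_to_dot_bracket matrix → Spec_matrix_to_dot_bracket matrix (matrix_to_dot_bracket matrix)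

-- ===== LEMMAS AND PROOFS =====

-- cell access, Nat indices, total via defaults
def pvM (matrix : List (List Int)) (i j : Nat) : Int := ((matrix.getD i []).getD j 0)

-- Bool tests: some partner to the right of i / some partner above k among the first m rows
def pvOpn (matrix : List (List Int)) (n i : Nat) : Bool :=
  (List.range (n - (i + 1))).any (fun j => pvM matrix i (i + 1 + j) == 1)
def pvCls (matrix : List (List Int)) (m k : Nat) : Bool :=
  (List.range m).any (fun i => pvM matrix i k == 1)

-- the state of A's array after the outer loop has processed rows 0..i-1
def pvG (matrix : List (List Int)) (n i k : Nat) : Char :=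
  if k < i ∧ pvOpn matrix n k = true then '('
  else if pvCls matrix (min i k) k = true then ')' else '.'

-- the state during row i, after t inner steps
def pvH (matrix : List (List Int)) (n i t k : Nat) : Char :=
  if k = i then
    (if (List.range t).any (fun j => pvM matrix i (i + 1 + j) == 1) then '(' else pvG matrix n i i)
  else if i + 1 ≤ k ∧ k < i + 1 + t then
    (if pvM matrix i k = 1 then ')' else pvG matrix n i k)
  else pvG matrix n i k

theorem pv_set_map_range {n p : Nat} (f : Nat → Char) (c : Char) (_hp : p < n) :
    ((List.range n).map f).set p c = (List.range n).map (fun k => if k = p then c else f k) := by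
  apply List.ext_getElem
  · simp
  · intro k h1 h2
    simp only [List.getElem_set, List.getElem_map, List.getElem_range]
    by_cases h : k = p
    · simp [h]
    · rw [if_neg (fun hh => h hh.symm), if_neg h]

theorem pv_inner (matrix : List (List Int)) (n i : Nat) (hi : i < n) :
    ∀ t, t ≤ n - (i + 1) →
      (List.range t).foldl (fun db j =>
          if pvM matrix i (i + 1 + j) = 1 then (db.set i '(').set (i + 1 + j) ')' else db)
        ((List.range n).map (pvG matrix n i))
      = (List.range n).map (pvH matrix n i t) := by
  intro t
  induction t with
  | zero =>
    intro _
    simp only [List.range_zero, List.foldl_nil]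
    refine List.map_congr_left ?_
    intro k _
    by_cases h1 : k = i
    · subst h1; simp [pvH]
    · have h2 : ¬ (i + 1 ≤ k ∧ k < i + 1 + 0) := by omega
      simp [pvH, h1]
  | succ t ih =>
    intro ht
    have ht' : t ≤ n - (i + 1) := by omega
    have hjn : i + 1 + t < n := by omega
    rw [List.range_succ, List.foldl_append, ih ht']
    simp only [List.foldl_cons, List.foldl_nil]
    by_cases hM : pvM matrix i (i + 1 + t) = 1
    · rw [if_pos hM, pv_set_map_range _ _ hi, pv_set_map_range _ _ hjn]
      refine List.map_congr_left ?_
      intro k hk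
      simp only [List.mem_range] at hk
      by_cases hki : k = i
      · rw [if_neg (by omega : ¬ k = i + 1 + t), if_pos hki]
        simp only [pvH, hki]
        rw [List.range_succ]
        simp [hM]
      · by_cases hkj : k = i + 1 + t
        · rw [if_pos hkj]
          have hMk : pvM matrix i k = 1 := by rw [hkj]; exact hM
          simp only [pvH]
          rw [if_neg hki, if_pos (by omega : i + 1 ≤ k ∧ k < i + 1 + (t + 1)), if_pos hMk]
        · rw [if_neg hkj, if_neg hki]
          simp only [pvH]
          rw [if_neg hki, if_neg hki]
          by_cases hw : i + 1 ≤ k ∧ k < i + 1 + t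
          · rw [if_pos hw, if_pos (by omega : i + 1 ≤ k ∧ k < i + 1 + (t + 1))]
          · rw [if_neg hw, if_neg (by omega : ¬ (i + 1 ≤ k ∧ k < i + 1 + (t + 1)))]
    · rw [if_neg hM]
      refine List.map_congr_left ?_
      intro k hk
      simp only [List.mem_range] at hk
      by_cases hki : k = i
      · simp only [pvH]
        rw [if_pos hki, if_pos hki, List.range_succ]
        simp [hM]
      · by_cases hkj : k = i + 1 + t
        · have hMk : ¬ pvM matrix i k = 1 := by rw [hkj]; exact hM
          simp only [pvH]
          rw [if_neg hki, if_neg hki,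
              if_neg (by omega : ¬ (i + 1 ≤ k ∧ k < i + 1 + t)),
              if_pos (by omega : i + 1 ≤ k ∧ k < i + 1 + (t + 1)), if_neg hMk]
        · simp only [pvH]
          rw [if_neg hki, if_neg hki]
          by_cases hw : i + 1 ≤ k ∧ k < i + 1 + t
          · rw [if_pos hw, if_pos (by omega : i + 1 ≤ k ∧ k < i + 1 + (t + 1))]
          · rw [if_neg hw, if_neg (by omega : ¬ (i + 1 ≤ k ∧ k < i + 1 + (t + 1)))]

theorem pv_inner_final (matrix : List (List Int)) (n i : Nat) (hi : i < n) :
    ∀ k < n, pvH matrix n i (n - (i + 1)) k = pvG matrix n (i + 1) k := by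
  intro k hk
  by_cases hki : k = i
  · rw [hki]
    simp only [pvH, if_true]
    have he : ((List.range (n - (i + 1))).any (fun j => pvM matrix i (i + 1 + j) == 1))
        = pvOpn matrix n i := rfl
    rw [he]
    by_cases ho : pvOpn matrix n i = true <;> simp [pvG, ho]
  · simp only [pvH, if_neg hki, pvG]
    by_cases hw : i + 1 ≤ k ∧ k < i + 1 + (n - (i + 1))
    · -- k > i
      rw [if_pos hw,
          if_neg (by omega : ¬ (k < i ∧ pvOpn matrix n k = true)),
          if_neg (by omega : ¬ (k < i + 1 ∧ pvOpn matrix n k = true)),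
          (show min i k = i by omega), (show min (i + 1) k = i + 1 by omega)]
      have hcls : pvCls matrix (i + 1) k = (pvCls matrix i k || (pvM matrix i k == 1)) := by
        simp [pvCls, List.range_succ]
      by_cases hM : pvM matrix i k = 1
      · rw [if_pos hM, hcls]
        simp [hM]
      · rw [if_neg hM, hcls]
        simp [hM]
    · -- k < i
      have hklt : k < i := by omega
      rw [if_neg hw,
          (show min i k = k by omega), (show min (i + 1) k = k by omega)]
      have hklt1 : k < i + 1 := by omega
      by_cases ho : pvOpn matrix n k = true <;> simp [ho, hklt, hklt1]

theorem pv_outer (matrix : List (List Int)) (n : Nat) (hn : n = matrix.length) :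
    ∀ i ≤ n,
      (List.range i).foldl (fun db i =>
          (List.range (n - (i + 1))).foldl (fun db j =>
            if pvM matrix i (i + 1 + j) = 1 then (db.set i '(').set (i + 1 + j) ')' else db) db)
        (List.replicate n '.')
      = (List.range n).map (pvG matrix n i) := by
  have hbase : (List.replicate n '.') = (List.range n).map (pvG matrix n 0) := by
    apply List.ext_getElem
    · simp
    · intro k h1 h2
      simp [pvG, pvCls]
  intro i
  induction i with
  | zero => intro _; simpa using hbase
  | succ i ih =>
    intro hle
    have hi : i < n := by omega
    rw [List.range_succ, List.foldl_append, ih (by omega)]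
    simp only [List.foldl_cons, List.foldl_nil]
    rw [pv_inner matrix n i hi (n - (i + 1)) le_rfl]
    exact List.map_congr_left (fun k hk => pv_inner_final matrix n i hi k (List.mem_range.mp hk))

-- A-port reduced to the Nat-indexed nested fold
theorem pv_A_eq (matrix : List (List Int)) :
    matrix_to_dot_bracket matrix
      = String.ofList ((List.range matrix.length).foldl (fun db i =>
          (List.range (matrix.length - (i + 1))).foldl (fun db j =>
            if pvM matrix i (i + 1 + j) = 1 then (db.set i '(').set (i + 1 + j) ')' else db) db)
        (List.replicate matrix.length '.')) := by
  unfold matrix_to_dot_bracket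
  simp only [PySem.List.len, PySem.List.pyRange_zero_natCast, List.foldl_map, Int.toNat_natCast]
  congr 1
  apply PySem.List.foldl_congr_mem
  intro db i0 _
  have h1 : ((i0 : Int) + 1) = ((i0 + 1 : Nat) : Int) := by push_cast; ring
  rw [h1, PySem.List.pyRange_one]
  have h2 : (((matrix.length : Int)) - ((i0 + 1 : Nat) : Int)).toNat = matrix.length - (i0 + 1) := by
    omega
  rw [h2, List.foldl_map]
  apply PySem.List.foldl_congr_mem
  intro db j hj
  have h3 : ((i0 + 1 : Nat) : Int) + (j : Int) = ((i0 + 1 + j : Nat) : Int) := by push_cast; ring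
  rw [h3]
  simp only [PySem.List.pyGetD_natCast, Int.toNat_natCast, pvM]
  have h4 : i0 + 1 + j = i0 + (1 + j) := by omega
  rw [h4]
  rfl

-- B-port reduced to the Nat-indexed per-position map
theorem pv_B_eq (matrix : List (List Int)) :
    matrix_to_dot_bracket_alt matrix
      = String.ofList ((List.range matrix.length).map (fun k =>
          if pvOpn matrix matrix.length k = true then '('
          else if pvCls matrix k k = true then ')' else '.')) := by
  unfold matrix_to_dot_bracket_alt
  simp only [PySem.List.len, PySem.List.pyRange_zero_natCast, List.map_map]
  congr 1
  refine List.map_congr_left ?_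
  intro k hk
  simp only [Function.comp]
  have h1 : ((k : Int) + 1) = ((k + 1 : Nat) : Int) := by push_cast; ring
  rw [h1, PySem.List.pyRange_one, PySem.List.pyRange_zero_natCast]
  have h2 : (((matrix.length : Int)) - ((k + 1 : Nat) : Int)).toNat = matrix.length - (k + 1) := by
    omega
  rw [h2, List.any_map, List.any_map]
  have h3 : ∀ j : Nat, ((k + 1 : Nat) : Int) + (j : Int) = ((k + 1 + j : Nat) : Int) := by
    intro j; push_cast; ring
  simp only [Function.comp_def, h3, PySem.List.pyGetD_natCast, pvOpn, pvCls, pvM]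
  rfl

-- at i = n the loop state is exactly B's per-position rule
theorem pv_G_final (matrix : List (List Int)) (n : Nat) (k : Nat) (hk : k < n) :
    pvG matrix n n k
      = (if pvOpn matrix n k = true then '(' else if pvCls matrix k k = true then ')' else '.') := by
  simp only [pvG]
  have hmin : min n k = k := by omega
  rw [hmin]
  by_cases ho : pvOpn matrix n k = true
  · rw [if_pos ⟨hk, ho⟩, if_pos ho]
  · rw [if_neg (by simp [ho]), if_neg ho]

-- ===== VERDICT (by name: the statement is the Claim_ definition above) =====
theorem matrix_to_dot_bracket_spec : Claim_equal_matrix_to_dot_bracket := by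
  intro matrix _ _
  unfold Spec_matrix_to_dot_bracket
  rw [pv_A_eq, pv_B_eq, pv_outer matrix matrix.length rfl matrix.length le_rfl]
  exact congrArg _ (List.map_congr_left (fun k hk =>
    pv_G_final matrix matrix.length k (List.mem_range.mp hk)))
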